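-- pv_equiv track=rewrite | github.com/mouredev/retos-programacion-2023 | Retos/Reto #31 - EL ÁBACO [Fácil]/python/Red-Clay.py | ReadAbaco
-- ===== SOURCE A (Python) =====
-- def ReadAbaco(abaco,delimiter):
--     Total = 0
--     abac_count = len(abaco)
--
--     for i, x in enumerate(abaco):
--         i = (abac_count - i) - 1
--         str_1 = x.split(delimiter)[0]
--         count = len(str_1)
--         Total += (10**i) * count
--
--     return Total
-- ===== SOURCE B (Python) =====
-- def ReadAbaco(abaco, delimiter):
--     Total = 0
--     for x in abaco:
--         Total = Total * 10 + len(x.split(delimiter)[0])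
--     return Total
-- ===== Notes on version B (the rewrite author's own statement) =====
-- stated objective: simpler
-- what changed: Horner's method: a single accumulate Total = Total*10 + digit over the rows replaces the len(abaco) pre-pass, the reversed-index arithmetic and the per-row 10**i exponentiation.
import Mathlib
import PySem

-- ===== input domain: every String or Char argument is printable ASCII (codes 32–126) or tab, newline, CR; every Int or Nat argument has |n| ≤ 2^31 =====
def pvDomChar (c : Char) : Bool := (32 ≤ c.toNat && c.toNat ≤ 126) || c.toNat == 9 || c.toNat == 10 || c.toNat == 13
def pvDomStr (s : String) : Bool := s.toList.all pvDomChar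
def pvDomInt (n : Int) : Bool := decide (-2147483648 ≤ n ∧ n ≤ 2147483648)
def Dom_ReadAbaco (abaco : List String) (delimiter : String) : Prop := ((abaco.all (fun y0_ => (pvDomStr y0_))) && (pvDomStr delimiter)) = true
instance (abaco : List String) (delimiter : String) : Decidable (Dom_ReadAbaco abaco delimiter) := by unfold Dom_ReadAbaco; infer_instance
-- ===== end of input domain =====

-- B (Horner's method) replaces A's power-weighted sum with a single multiply-add accumulation; objective: simpler.

-- ===== PORT A =====
-- x.split(delimiter)[0]: split? is none only for delimiter = "" (excluded by Pre_, where
-- Python raises ValueError); the split result is always nonempty, so [0] is its head.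
-- The loop index i = (abac_count - i) - 1 is always ≥ 0 (enumerate indices are < length),
-- so 10**i is the Nat power 10 ^ i.toNat exactly.
def ReadAbaco (abaco : List String) (delimiter : String) : Int :=
  let abacCount : Int := abaco.length
  (PySem.List.enumerate abaco).foldl
    (fun Total ix =>
      let i : Int := (abacCount - ix.1) - 1
      let str1 : String := ((PySem.Str.split? ix.2 delimiter).getD [""]).headD ""
      let count : Int := PySem.Str.len str1
      Total + (10 ^ i.toNat) * count)
    0

-- ===== PORT B =====
def ReadAbaco_alt (abaco : List String) (delimiter : String) : Int :=
  abaco.foldl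
    (fun Total x =>
      Total * 10 + (PySem.Str.len (((PySem.Str.split? x delimiter).getD [""]).headD "") : Int))
    0

-- ===== PRECONDITION & SPEC =====
-- Pre_ excludes only delimiter = "", on which Python's str.split raises ValueError (in A and in B alike).
def Pre_ReadAbaco (abaco : List String) (delimiter : String) : Prop := delimiter ≠ ""
instance (abaco : List String) (delimiter : String) : Decidable (Pre_ReadAbaco abaco delimiter) := by unfold Pre_ReadAbaco; infer_instance

def pvWitness_ReadAbaco : List String × String := (["ooo|", "o|"], "|")

def Spec_ReadAbaco (abaco : List String) (delimiter : String) (out : Int) : Prop := out = ReadAbaco_alt abaco delimiter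
instance (abaco : List String) (delimiter : String) (out : Int) : Decidable (Spec_ReadAbaco abaco delimiter out) := by unfold Spec_ReadAbaco; infer_instance

-- ===== CLAIM (what is proved, stated in full; the proofs are below) =====
def Claim_equal_ReadAbaco : Prop := ∀ (abaco : List String) (delimiter : String), Dom_ReadAbaco abaco delimiter → Pre_ReadAbaco abaco delimiter → Spec_ReadAbaco abaco delimiter (ReadAbaco abaco delimiter)

-- ===== LEMMAS AND PROOFS =====

-- the per-row digit, shared shape of both ports
def pvDigit (delimiter x : String) : Int :=
  (PySem.Str.len (((PySem.Str.split? x delimiter).getD [""]).headD "") : Int)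

-- Horner fold: pulling the accumulator out front
theorem horner_shift (delimiter : String) (xs : List String) : ∀ (a : Int),
    xs.foldl (fun T x => T * 10 + pvDigit delimiter x) a
      = a * 10 ^ xs.length + xs.foldl (fun T x => T * 10 + pvDigit delimiter x) 0 := by
  induction xs with
  | nil => intro a; simp
  | cons x xs ih =>
    intro a
    simp only [List.foldl_cons, List.length_cons]
    rw [ih (a * 10 + pvDigit delimiter x), ih (0 * 10 + pvDigit delimiter x)]
    ring

-- A's enumerate loop, generalized over the start index, equals the Horner fold scaled
theorem loop_eq (delimiter : String) (N : Int) (xs : List String) : ∀ (s T : Int),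
    s + xs.length ≤ N →
    (PySem.List.enumerate xs s).foldl
      (fun Total ix => Total + (10 ^ (((N - ix.1) - 1).toNat)) * pvDigit delimiter ix.2) T
      = T + (xs.foldl (fun T x => T * 10 + pvDigit delimiter x) 0) * 10 ^ ((N - s - xs.length).toNat) := by
  induction xs with
  | nil => intro s T _; simp [PySem.List.enumerate_nil]
  | cons x xs ih =>
    intro s T hle
    simp only [List.length_cons] at hle
    rw [PySem.List.enumerate_cons, List.foldl_cons,
        ih (s + 1) _ (by push_cast at hle ⊢; omega),
        List.foldl_cons, horner_shift delimiter xs (0 * 10 + pvDigit delimiter x)]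
    have h1 : ((N - s) - 1).toNat = xs.length + (N - (s + 1) - xs.length).toNat := by
      push_cast at hle; omega
    have h2 : (N - s - ((x :: xs).length : Int)).toNat = (N - (s + 1) - xs.length).toNat := by
      simp only [List.length_cons]; push_cast at hle ⊢; omega
    rw [h1, h2, pow_add]
    ring

-- ===== VERDICT (by name: the statement is the Claim_ definition above) =====
theorem ReadAbaco_spec : Claim_equal_ReadAbaco := by
  intro abaco delimiter _ _
  unfold Spec_ReadAbaco ReadAbaco ReadAbaco_alt
  have := loop_eq delimiter (abaco.length) abaco 0 0 (by simp)
  simp only [pvDigit] at this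
  simp only [this]
  simp
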